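-- pv_equiv track=rewrite | github.com/inaciovasquez2020/overlap-rigidity-counterexamples | scripts/local_cycle_rank.py | cycle_rank
-- ===== SOURCE A (Python) =====
-- from collections import deque, defaultdict
--
-- def count_edges(adj):
--     """
--     Number of undirected edges.
--     """
--     return sum(len(adj[v]) for v in adj) // 2
--
-- def count_vertices(adj):
--     return len(adj)
--
-- def cycle_rank(adj):
--     """
--     Cycle rank = |E| - |V| + c,
--     where c is number of connected components.
--     """
--     visited = set()
--     comps = 0
--
--     for v in adj:
--         if v not in visited:
--             comps += 1
--             q = deque([v])
--             visited.add(v)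
--             while q:
--                 u = q.popleft()
--                 for w in adj[u]:
--                     if w not in visited:
--                         visited.add(w)
--                         q.append(w)
--
--     return count_edges(adj) - count_vertices(adj) + comps
-- ===== SOURCE B (Python) =====
-- def cycle_rank(adj):
--     """
--     Cycle rank = |E| - |V| + c,
--     where c is number of connected components.
--     Alternative algorithm for c: min-label propagation (Bellman-Ford style).
--     Every vertex starts labelled with its own position; labels are relaxed
--     along edges (lab[w] = min(lab[w], lab[u])) until stable, so each vertex
--     ends up with the position of the first vertex that reaches it; c is the
--     number of vertices keeping their own label.
--     """
--     keys = list(adj)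
--     pos = {v: i for i, v in enumerate(keys)}
--     lab = list(range(len(keys)))
--     changed = True
--     while changed:
--         changed = False
--         for i, u in enumerate(keys):
--             for w in adj[u]:
--                 j = pos[w]
--                 if lab[j] > lab[i]:
--                     lab[j] = lab[i]
--                     changed = True
--     comps = sum(1 for i in range(len(keys)) if lab[i] == i)
--     edges = sum(len(ns) for ns in adj.values()) // 2
--     return edges - len(keys) + comps
-- ===== Notes on version B (the rewrite author's own statement) =====
-- stated objective: alternative
-- what changed: Components are counted by Bellman-Ford-style min-label propagation - every vertex starts labelled with its own position, labels are relaxed along edges (lab[w] = min(lab[w], lab[u])) until a full pass changes nothing, and a component is counted for each vertex that keeps its own label - instead of A's BFS flood fill with a deque and a visited set.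
import Mathlib
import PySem

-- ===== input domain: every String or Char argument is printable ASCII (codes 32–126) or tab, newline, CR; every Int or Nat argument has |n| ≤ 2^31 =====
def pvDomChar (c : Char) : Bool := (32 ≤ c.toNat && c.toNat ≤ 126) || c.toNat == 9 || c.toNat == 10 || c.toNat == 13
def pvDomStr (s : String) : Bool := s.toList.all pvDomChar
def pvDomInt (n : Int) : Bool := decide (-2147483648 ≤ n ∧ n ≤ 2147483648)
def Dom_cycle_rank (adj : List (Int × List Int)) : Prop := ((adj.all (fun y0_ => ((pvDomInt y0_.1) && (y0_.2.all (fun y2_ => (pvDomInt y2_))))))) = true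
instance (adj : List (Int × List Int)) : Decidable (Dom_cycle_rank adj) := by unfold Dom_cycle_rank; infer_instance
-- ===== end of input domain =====

-- B replaces A's BFS flood fill (deque + visited set) by Bellman-Ford-style min-label
-- propagation: labels are relaxed along edges until stable and a component is counted for
-- each vertex keeping its own label; same return value, objective: alternative.

-- ===== PORT A =====
-- count_edges(adj) = sum(len(adj[v]) for v in adj) // 2
def pv_count_edges (adj : List (Int × List Int)) : Int :=
  PySem.Int.floordiv
    (((PySem.Dict.mk adj).keys.map
        (fun v => PySem.List.len ((PySem.Dict.mk adj).getD v []))).sum) 2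

-- count_vertices(adj) = len(adj)
def pv_count_vertices (adj : List (Int × List Int)) : Int :=
  ((PySem.Dict.mk adj).size : Int)

-- while q: u = q.popleft(); for w in adj[u]: if w not in visited: visited.add(w); q.append(w)
-- fuel makes the while-loop structural; adj.length + 1 pops suffice under Pre_ (proved below).
def pvBfs (adj : List (Int × List Int)) : Nat → List Int → PySem.Set Int → PySem.Set Int
  | 0, _, visited => visited
  | _ + 1, [], visited => visited
  | fuel + 1, u :: q, visited =>
      let s := ((PySem.Dict.mk adj).getD u []).foldl
        (fun (s : List Int × PySem.Set Int) w =>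
          if PySem.Set.contains s.2 w then s
          else (s.1 ++ [w], PySem.Set.add s.2 w)) (q, visited)
      pvBfs adj fuel s.1 s.2

def cycle_rank (adj : List (Int × List Int)) : Int :=
  let s := (PySem.Dict.mk adj).keys.foldl
    (fun (s : PySem.Set Int × Int) v =>
      if PySem.Set.contains s.1 v then s
      else (pvBfs adj (adj.length + 1) [v] (PySem.Set.add s.1 v), s.2 + 1))
    (PySem.Set.empty, 0)
  pv_count_edges adj - pv_count_vertices adj + s.2

-- ===== PORT B =====
-- pos = {v: i for i, v in enumerate(keys)}
def pvPos (keys : List Int) : PySem.Dict Int Int :=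
  PySem.Dict.mk ((PySem.List.enumerate keys 0).map (fun p => (p.2, p.1)))

-- loop body: j = pos[w]; if lab[j] > lab[i]: lab[j] = lab[i]; changed = True
-- pos.get? w = none is exactly where Python raises KeyError (a neighbour that is not a key),
-- which Pre_ excludes; pos values and enumerate indices are always in range of lab, so the
-- total index forms pyGetD/pySetD compute exactly Python's lab[j] / lab[i] / assignment here.
def pvRStep (pos : PySem.Dict Int Int) (i : Int) (st : List Int × Bool) (w : Int) :
    List Int × Bool :=
  match pos.get? w with
  | none => st
  | some j =>
      if PySem.List.pyGetD st.1 j 0 > PySem.List.pyGetD st.1 i 0 then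
        (PySem.List.pySetD st.1 j (PySem.List.pyGetD st.1 i 0), true)
      else st

-- for i, u in enumerate(keys): for w in adj[u]: <pvRStep>
def pvPassB (adj : List (Int × List Int)) (keys : List Int) (pos : PySem.Dict Int Int)
    (st : List Int × Bool) : List Int × Bool :=
  (PySem.List.enumerate keys 0).foldl
    (fun st iu => ((PySem.Dict.mk adj).getD iu.2 []).foldl (pvRStep pos iu.1) st) st

-- while changed: changed = False; <one pass> — fuel makes the while-loop structural;
-- n*n+1 passes suffice: each changing pass strictly decreases the label sum, initially < n*n
-- (proved below).
def pvLabLoop (adj : List (Int × List Int)) (keys : List Int) (pos : PySem.Dict Int Int) :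
    Nat → List Int → List Int
  | 0, lab => lab
  | fuel + 1, lab =>
      let st := pvPassB adj keys pos (lab, false)
      if st.2 then pvLabLoop adj keys pos fuel st.1 else st.1

def cycle_rank_alt (adj : List (Int × List Int)) : Int :=
  let keys := (PySem.Dict.mk adj).keys
  let n := keys.length
  let lab := pvLabLoop adj keys (pvPos keys) (n * n + 1) (PySem.List.pyRange 0 (n : Int) 1)
  let comps := (PySem.List.pyRange 0 (n : Int) 1).foldl
      (fun (c : Int) i => if PySem.List.pyGetD lab i 0 = i then c + 1 else c) 0
  PySem.Int.floordiv (((PySem.Dict.mk adj).values.map PySem.List.len).sum) 2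
    - (n : Int) + comps

-- ===== PRECONDITION & SPEC =====
-- Pre_ excludes (a) association lists with duplicate keys — a Python dict cannot hold them, they are an
-- artefact of the list encoding — and (b) inputs where some neighbour is not a key of adj, on which A
-- raises KeyError when that neighbour is dequeued.
def Pre_cycle_rank (adj : List (Int × List Int)) : Prop :=
  (adj.map Prod.fst).Nodup ∧ ∀ p ∈ adj, ∀ w ∈ p.2, w ∈ adj.map Prod.fst
instance (adj : List (Int × List Int)) : Decidable (Pre_cycle_rank adj) := by
  unfold Pre_cycle_rank; infer_instance

def pvWitness_cycle_rank : (List (Int × List Int)) := [(1, [2]), (2, [1]), (3, [])]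

def Spec_cycle_rank (adj : List (Int × List Int)) (out : Int) : Prop := out = cycle_rank_alt adj
instance (adj : List (Int × List Int)) (out : Int) : Decidable (Spec_cycle_rank adj out) := by
  unfold Spec_cycle_rank; infer_instance

-- ===== CLAIM (what is proved, stated in full; the proofs are below) =====
def Claim_equal_cycle_rank : Prop := ∀ (adj : List (Int × List Int)), Dom_cycle_rank adj → Pre_cycle_rank adj → Spec_cycle_rank adj (cycle_rank adj)

-- ===== LEMMAS AND PROOFS =====

-- adj[u] as both ports read it
def pvNb (adj : List (Int × List Int)) (u : Int) : List Int :=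
  (PySem.Dict.mk adj).getD u []

-- reachability along the directed adjacency
def pvReach (adj : List (Int × List Int)) : Int → Int → Prop :=
  Relation.ReflTransGen (fun a b => b ∈ pvNb adj a)

theorem pvContains_false {s : PySem.Set Int} {x : Int} (hx : x ∉ s) :
    PySem.Set.contains s x = false := by
  cases hb : PySem.Set.contains s x
  · rfl
  · exact absurd ((PySem.Set.contains_iff s x).1 hb) hx

theorem pvGet?_mem (adj : List (Int × List Int)) (u : Int) (l : List Int)
    (h : (PySem.Dict.mk adj).get? u = some l) : (u, l) ∈ adj := by
  induction adj with
  | nil =>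
      have hnone : (PySem.Dict.mk ([] : List (Int × List Int))).get? u = none := rfl
      rw [hnone] at h
      cases h
  | cons p rest ih =>
      obtain ⟨k, v⟩ := p
      rw [PySem.Dict.get?_mk_cons] at h
      by_cases hk : k = u
      · subst hk
        simp at h
        simp [h]
      · have hb : (k == u) = false := beq_false_of_ne hk
        rw [hb] at h
        simp at h
        exact List.mem_cons_of_mem _ (ih h)

theorem pvNb_spec (adj : List (Int × List Int)) (u : Int) :
    pvNb adj u = [] ∨ (u, pvNb adj u) ∈ adj := by
  unfold pvNb
  rw [PySem.Dict.getD_eq_get?_getD]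
  cases h : (PySem.Dict.mk adj).get? u with
  | none => simp
  | some l => simpa using Or.inr (pvGet?_mem adj u l h)

-- every neighbour list the ports ever read is contained in the key list (uses Pre_ clause (b))
theorem pvNb_closed (adj : List (Int × List Int))
    (hPre : ∀ p ∈ adj, ∀ w ∈ p.2, w ∈ adj.map Prod.fst) :
    ∀ u, ∀ w ∈ pvNb adj u, w ∈ adj.map Prod.fst := by
  intro u w hw
  rcases pvNb_spec adj u with h | h
  · rw [h] at hw; cases hw
  · exact hPre _ h w hw

-- the inner for-loop of A's BFS as a function of (queue, visited)
def pvFoldQV (ws q : List Int) (vis : PySem.Set Int) : List Int × PySem.Set Int :=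
  ws.foldl
    (fun (s : List Int × PySem.Set Int) w =>
      if PySem.Set.contains s.2 w then s
      else (s.1 ++ [w], PySem.Set.add s.2 w)) (q, vis)

theorem pvFoldQV_cons (w : Int) (ws q : List Int) (vis : PySem.Set Int) :
    pvFoldQV (w :: ws) q vis =
      if w ∈ vis then pvFoldQV ws q vis
      else pvFoldQV ws (q ++ [w]) (PySem.Set.add vis w) := by
  by_cases h : w ∈ vis
  · simp [pvFoldQV, h]
  · simp [pvFoldQV, h]

theorem pvBfs_step (adj : List (Int × List Int)) (fuel : Nat) (u : Int) (q : List Int)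
    (vis : PySem.Set Int) :
    pvBfs adj (fuel + 1) (u :: q) vis =
      pvBfs adj fuel (pvFoldQV (pvNb adj u) q vis).1 (pvFoldQV (pvNb adj u) q vis).2 := rfl

theorem pvAdd_toFinset {vis : PySem.Set Int} {w : Int} (h : w ∉ vis) :
    (PySem.Set.add vis w).toFinset = insert w vis.toFinset := by
  rw [PySem.Set.add_of_not_mem h]
  ext a
  simp

theorem pvAdd_card {vis : PySem.Set Int} {w : Int} (h : w ∉ vis) :
    (PySem.Set.add vis w).toFinset.card = vis.toFinset.card + 1 := by
  rw [pvAdd_toFinset h, Finset.card_insert_of_notMem (by simpa using h)]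

-- one bundle of invariants for A's inner for-loop
theorem pvFoldQV_bundle (ws : List Int) : ∀ (q : List Int) (vis : PySem.Set Int),
    (∀ x ∈ vis, x ∈ (pvFoldQV ws q vis).2) ∧
    (∀ x ∈ q, x ∈ (pvFoldQV ws q vis).1) ∧
    (∀ x ∈ (pvFoldQV ws q vis).2, x ∈ vis ∨ x ∈ ws) ∧
    (∀ x ∈ (pvFoldQV ws q vis).1, x ∈ q ∨ x ∈ ws) ∧
    (∀ w ∈ ws, w ∈ (pvFoldQV ws q vis).2) ∧
    (∀ x ∈ (pvFoldQV ws q vis).2, x ∈ vis ∨ x ∈ (pvFoldQV ws q vis).1) ∧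
    ((∀ x ∈ q, x ∈ vis) → ∀ x ∈ (pvFoldQV ws q vis).1, x ∈ (pvFoldQV ws q vis).2) ∧
    ((pvFoldQV ws q vis).1.length + vis.toFinset.card
      = q.length + (pvFoldQV ws q vis).2.toFinset.card) := by
  induction ws with
  | nil =>
      intro q vis
      refine ⟨fun x hx => hx, fun x hx => hx, ?_, ?_, ?_, ?_, ?_, ?_⟩ <;>
        · simp [pvFoldQV]
          try tauto
  | cons w ws ih =>
      intro q vis
      rw [pvFoldQV_cons]
      by_cases hw : w ∈ vis
      · rw [if_pos hw]
        obtain ⟨a, b, c, d, e, f, g, h⟩ := ih q vis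
        refine ⟨a, b, ?_, ?_, ?_, f, g, h⟩
        · intro x hx; rcases c x hx with h' | h' <;> simp [h', List.mem_cons]
        · intro x hx; rcases d x hx with h' | h' <;> simp [h', List.mem_cons]
        · intro x hx
          rcases List.mem_cons.1 hx with rfl | hx'
          · exact a x hw
          · exact e x hx'
      · rw [if_neg hw]
        obtain ⟨a, b, c, d, e, f, g, h⟩ := ih (q ++ [w]) (PySem.Set.add vis w)
        have hwadd : w ∈ PySem.Set.add vis w := (PySem.Set.mem_add vis w w).2 (Or.inr rfl)
        have hmemadd : ∀ x, x ∈ PySem.Set.add vis w → x ∈ vis ∨ x = w :=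
          fun x hx => (PySem.Set.mem_add vis w x).1 hx
        refine ⟨?_, ?_, ?_, ?_, ?_, ?_, ?_, ?_⟩
        · intro x hx; exact a x ((PySem.Set.mem_add vis w x).2 (Or.inl hx))
        · intro x hx; exact b x (by simp [hx])
        · intro x hx
          rcases c x hx with h' | h'
          · rcases hmemadd x h' with h'' | h''
            · exact Or.inl h''
            · subst h''; simp
          · simp [h']
        · intro x hx
          rcases d x hx with h' | h'
          · rcases List.mem_append.1 h' with h'' | h''
            · exact Or.inl h''
            · simp at h''; subst h''; simp
          · simp [h']
        · intro x hx
          rcases List.mem_cons.1 hx with rfl | hx'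
          · exact a x hwadd
          · exact e x hx'
        · intro x hx
          rcases f x hx with h' | h'
          · rcases hmemadd x h' with h'' | h''
            · exact Or.inl h''
            · exact Or.inr (b x (by simp [h'']))
          · exact Or.inr h'
        · intro hq x hx
          refine g ?_ x hx
          intro y hy
          rcases List.mem_append.1 hy with h' | h'
          · exact (PySem.Set.mem_add vis w y).2 (Or.inl (hq y h'))
          · simp at h'; subst h'; exact hwadd
        · have hcard := pvAdd_card hw
          have hlen : (q ++ [w]).length = q.length + 1 := by simp
          omega

-- visited only grows through the BFS loop
theorem pvBfs_mono (adj : List (Int × List Int)) :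
    ∀ (fuel : Nat) (q : List Int) (vis : PySem.Set Int),
      ∀ x ∈ vis, x ∈ pvBfs adj fuel q vis := by
  intro fuel
  induction fuel with
  | zero => intro q vis x hx; exact hx
  | succ fuel ih =>
      intro q vis x hx
      cases q with
      | nil => exact hx
      | cons u q =>
          rw [pvBfs_step]
          exact ih _ _ x ((pvFoldQV_bundle (pvNb adj u) q vis).1 x hx)

-- everything the BFS loop visits lies in any pvNb-closed superset of queue and visited
theorem pvBfs_subset (adj : List (Int × List Int)) (Z : Int → Prop)
    (hZ : ∀ u, Z u → ∀ w ∈ pvNb adj u, Z w) :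
    ∀ (fuel : Nat) (q : List Int) (vis : PySem.Set Int),
      (∀ x ∈ vis, Z x) → (∀ x ∈ q, Z x) →
      ∀ x ∈ pvBfs adj fuel q vis, Z x := by
  intro fuel
  induction fuel with
  | zero => intro q vis hvis _ x hx; exact hvis x hx
  | succ fuel ih =>
      intro q vis hvis hq x hx
      cases q with
      | nil => exact hvis x hx
      | cons u q =>
          rw [pvBfs_step] at hx
          obtain ⟨_, _, c, d, _, _, _, _⟩ := pvFoldQV_bundle (pvNb adj u) q vis
          have hws : ∀ w ∈ pvNb adj u, Z w := hZ u (hq u (List.mem_cons_self))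
          refine ih _ _ ?_ ?_ x hx
          · intro y hy; rcases c y hy with h' | h'
            · exact hvis y h'
            · exact hws y h'
          · intro y hy; rcases d y hy with h' | h'
            · exact hq y (List.mem_cons_of_mem _ h')
            · exact hws y h'

-- with enough fuel the BFS loop drains its queue and returns a pvNb-closed visited set
theorem pvBfs_closed (adj : List (Int × List Int))
    (hU : ∀ u, ∀ w ∈ pvNb adj u, w ∈ adj.map Prod.fst) :
    ∀ (fuel : Nat) (q : List Int) (vis : PySem.Set Int),
      (∀ x ∈ q, x ∈ vis) →
      (∀ x ∈ vis, x ∈ adj.map Prod.fst) →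
      (∀ u ∈ vis, u ∉ q → ∀ w ∈ pvNb adj u, w ∈ vis) →
      q.length + ((adj.map Prod.fst).toFinset.card - vis.toFinset.card) ≤ fuel →
      ∀ u ∈ pvBfs adj fuel q vis, ∀ w ∈ pvNb adj u, w ∈ pvBfs adj fuel q vis := by
  intro fuel
  induction fuel with
  | zero =>
      intro q vis hq hvisU hinv hfuel
      have hqnil : q = [] := by
        cases q with
        | nil => rfl
        | cons a q => simp at hfuel
      subst hqnil
      intro u hu w hw
      exact hinv u hu (by simp) w hw
  | succ fuel ih =>
      intro q vis hq hvisU hinv hfuel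
      cases q with
      | nil =>
          intro u hu w hw
          exact hinv u hu (by simp) w hw
      | cons u0 q =>
          rw [pvBfs_step]
          obtain ⟨a, b, c, d, e, f, g, h⟩ := pvFoldQV_bundle (pvNb adj u0) q vis
          have hqvis : ∀ x ∈ q, x ∈ vis := fun x hx => hq x (List.mem_cons_of_mem _ hx)
          have hvisU' : ∀ x ∈ (pvFoldQV (pvNb adj u0) q vis).2, x ∈ adj.map Prod.fst := by
            intro x hx
            rcases c x hx with h' | h'
            · exact hvisU x h'
            · exact hU u0 x h'
          have hsub1 : vis.toFinset ⊆ (pvFoldQV (pvNb adj u0) q vis).2.toFinset := by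
            intro x hx
            exact List.mem_toFinset.2 (a x (List.mem_toFinset.1 hx))
          have hsub2 : (pvFoldQV (pvNb adj u0) q vis).2.toFinset ⊆ (adj.map Prod.fst).toFinset := by
            intro x hx
            exact List.mem_toFinset.2 (hvisU' x (List.mem_toFinset.1 hx))
          have hc1 := Finset.card_le_card hsub1
          have hc2 := Finset.card_le_card hsub2
          refine ih _ _ (g hqvis) hvisU' ?_ ?_
          · intro u' hu' hu'q w hw
            rcases c u' hu' with h' | h'
            · by_cases huu : u' = u0
              · subst huu; exact e w hw
              · have : u' ∉ q := fun hmem => hu'q (b u' hmem)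
                exact a w (hinv u' h' (by simp [huu, this]) w hw)
            · rcases f u' hu' with h'' | h''
              · by_cases huu : u' = u0
                · subst huu; exact e w hw
                · by_cases huq : u' ∈ q
                  · exact absurd (b u' huq) hu'q
                  · exact a w (hinv u' h'' (by simp [huu, huq]) w hw)
              · exact absurd h'' hu'q
          · have hlen : (u0 :: q).length = q.length + 1 := rfl
            omega

-- the BFS call of A's outer loop computes exactly "old visited or reachable from v"
theorem pvBfs_mem_iff (adj : List (Int × List Int))
    (hU : ∀ u, ∀ w ∈ pvNb adj u, w ∈ adj.map Prod.fst)
    (vis : PySem.Set Int)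
    (hcl : ∀ u ∈ vis, ∀ w ∈ pvNb adj u, w ∈ vis)
    (hvisU : ∀ x ∈ vis, x ∈ adj.map Prod.fst)
    (v : Int) (hv : v ∈ adj.map Prod.fst) (hvv : v ∉ vis) :
    ∀ x, x ∈ pvBfs adj (adj.length + 1) [v] (PySem.Set.add vis v)
      ↔ (x ∈ vis ∨ pvReach adj v x) := by
  have hvadd : ∀ y, y ∈ PySem.Set.add vis v → y ∈ vis ∨ y = v :=
    fun y hy => (PySem.Set.mem_add vis v y).1 hy
  have hK : (adj.map Prod.fst).toFinset.card ≤ adj.length := by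
    calc (adj.map Prod.fst).toFinset.card ≤ (adj.map Prod.fst).length :=
          List.toFinset_card_le _
      _ = adj.length := by simp
  have hclR : ∀ u ∈ pvBfs adj (adj.length + 1) [v] (PySem.Set.add vis v),
      ∀ w ∈ pvNb adj u, w ∈ pvBfs adj (adj.length + 1) [v] (PySem.Set.add vis v) := by
    refine pvBfs_closed adj hU _ _ _ ?_ ?_ ?_ ?_
    · intro y hy
      rcases List.mem_cons.1 hy with rfl | h
      · exact (PySem.Set.mem_add vis _ _).2 (Or.inr rfl)
      · cases h
    · intro y hy
      rcases hvadd y hy with h | h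
      · exact hvisU y h
      · subst h; exact hv
    · intro u hu huq w hw
      rcases hvadd u hu with h | h
      · exact (PySem.Set.mem_add vis v w).2 (Or.inl (hcl u h w hw))
      · subst h; exact absurd List.mem_cons_self huq
    · have hlen : ([v] : List Int).length = 1 := rfl
      omega
  intro x
  constructor
  · intro hx
    refine pvBfs_subset adj (fun y => y ∈ vis ∨ pvReach adj v y) ?_ _ _ _ ?_ ?_ x hx
    · intro u hu w hw
      rcases hu with h | h
      · exact Or.inl (hcl u h w hw)
      · exact Or.inr (Relation.ReflTransGen.tail h hw)
    · intro y hy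
      rcases hvadd y hy with h | h
      · exact Or.inl h
      · subst h; exact Or.inr Relation.ReflTransGen.refl
    · intro y hy
      rcases List.mem_cons.1 hy with rfl | h
      · exact Or.inr Relation.ReflTransGen.refl
      · cases h
  · intro hx
    rcases hx with h | h
    · exact pvBfs_mono adj _ _ _ x ((PySem.Set.mem_add vis v x).2 (Or.inl h))
    · induction h with
      | refl => exact pvBfs_mono adj _ _ _ v ((PySem.Set.mem_add vis v v).2 (Or.inr rfl))
      | tail h1 h2 ih => exact hclR _ ih _ h2

-- pos lookups: pvPos maps the t-th key to t
theorem pvPos_get_aux (K : List Int) : ∀ (s : Int) (v : Int) (j : Int),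
    (PySem.Dict.mk ((PySem.List.enumerate K s).map (fun p => (p.2, p.1)))).get? v = some j →
    ∃ t : Nat, t < K.length ∧ K.getD t 0 = v ∧ j = s + t := by
  induction K with
  | nil =>
      intro s v j h
      rw [PySem.List.enumerate_nil] at h
      cases h
  | cons x K ih =>
      intro s v j h
      rw [PySem.List.enumerate_cons, List.map_cons, PySem.Dict.get?_mk_cons] at h
      by_cases hx : x = v
      · subst hx
        simp at h
        exact ⟨0, by simp, by simp, by omega⟩
      · rw [beq_false_of_ne hx] at h
        simp only [Bool.false_eq_true, if_false] at h
        obtain ⟨t, ht, hv, hj⟩ := ih (s + 1) v j h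
        exact ⟨t + 1, by simpa using ht, by simpa using hv, by push_cast; omega⟩

theorem pvPos_get_at_aux (K : List Int) : K.Nodup → ∀ (s : Int) (t : Nat), t < K.length →
    (PySem.Dict.mk ((PySem.List.enumerate K s).map (fun p => (p.2, p.1)))).get?
        (K.getD t 0) = some (s + t) := by
  induction K with
  | nil => intro _ s t ht; simp at ht
  | cons x K ih =>
      intro hnd s t ht
      rw [PySem.List.enumerate_cons, List.map_cons, PySem.Dict.get?_mk_cons]
      cases t with
      | zero => simp
      | succ t =>
          have htK : t < K.length := by simpa using ht
          have hmem : K.getD t 0 ∈ K := by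
            rw [List.getD_eq_getElem K 0 htK]
            exact List.getElem_mem htK
          have hx : x ≠ (x :: K).getD (t + 1) 0 := by
            simp only [List.getD_cons_succ]
            intro hcontra
            exact (List.nodup_cons.1 hnd).1 (hcontra ▸ hmem)
          rw [beq_false_of_ne hx]
          simp only [Bool.false_eq_true, if_false, List.getD_cons_succ]
          rw [ih (List.nodup_cons.1 hnd).2 (s + 1) t htK]
          congr 1
          push_cast
          omega

theorem pvPos_get_at (K : List Int) (hnd : K.Nodup) : ∀ (t : Nat), t < K.length →
    (pvPos K).get? (K.getD t 0) = some (t : Int) := by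
  intro t ht
  have := pvPos_get_at_aux K hnd 0 t ht
  rw [zero_add] at this
  exact this

-- the label invariant: every label is the position of some vertex reaching this one,
-- and is at most the vertex's own position
def pvInv (adj : List (Int × List Int)) (K : List Int) (lab : List Int) : Prop :=
  lab.length = K.length ∧
  ∀ t : Nat, t < K.length → ∃ m : Nat, m ≤ t ∧ lab.getD t 0 = (m : Int) ∧
    pvReach adj (K.getD m 0) (K.getD t 0)

def pvMeas (lab : List Int) : Nat := (lab.map Int.toNat).sum

-- no relaxation applies to L (one full pass leaves it unchanged)
def pvNoFire (adj : List (Int × List Int)) (K : List Int) (L : List Int) : Prop :=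
  ∀ t : Nat, t < K.length → ∀ w ∈ pvNb adj (K.getD t 0), ∀ j : Int,
    (pvPos K).get? w = some j →
    PySem.List.pyGetD L j 0 ≤ PySem.List.pyGetD L (t : Int) 0

-- sum of a Nat list decreases when an entry is lowered
theorem pvSum_set_lt (l : List Nat) : ∀ (i : Nat) (a : Nat), i < l.length → a < l.getD i 0 →
    (l.set i a).sum < l.sum := by
  induction l with
  | nil => intro i a h; simp at h
  | cons x l ih =>
      intro i a hi ha
      cases i with
      | zero => simp at ha ⊢; omega
      | succ i =>
          simp only [List.set_cons_succ, List.sum_cons]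
          have := ih i a (by simpa using hi) (by simpa using ha)
          omega

theorem pvRStep_none (pos : PySem.Dict Int Int) (i : Int) (st : List Int × Bool) (w : Int)
    (hj : pos.get? w = none) : pvRStep pos i st w = st := by
  unfold pvRStep; rw [hj]

theorem pvRStep_some (pos : PySem.Dict Int Int) (i : Int) (st : List Int × Bool) (w : Int)
    (j : Int) (hj : pos.get? w = some j) :
    pvRStep pos i st w =
      if PySem.List.pyGetD st.1 j 0 > PySem.List.pyGetD st.1 i 0 then
        (PySem.List.pySetD st.1 j (PySem.List.pyGetD st.1 i 0), true)
      else st := by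
  unfold pvRStep; rw [hj]

-- one relax step: preserves the invariant, never increases the measure, flag is monotone,
-- a false flag means nothing happened, a new true flag means a strict decrease
theorem pvRStep_facts (adj : List (Int × List Int)) (K : List Int)
    (t : Nat) (ht : t < K.length)
    (st : List Int × Bool) (w : Int) (hw : w ∈ pvNb adj (K.getD t 0))
    (hInv : pvInv adj K st.1) :
    pvInv adj K (pvRStep (pvPos K) (t : Int) st w).1 ∧
    pvMeas (pvRStep (pvPos K) (t : Int) st w).1 ≤ pvMeas st.1 ∧
    (st.2 = true → (pvRStep (pvPos K) (t : Int) st w).2 = true) ∧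
    ((pvRStep (pvPos K) (t : Int) st w).2 = false →
      pvRStep (pvPos K) (t : Int) st w = st ∧
      ∀ j : Int, (pvPos K).get? w = some j →
        PySem.List.pyGetD st.1 j 0 ≤ PySem.List.pyGetD st.1 (t : Int) 0) ∧
    ((pvRStep (pvPos K) (t : Int) st w).2 = true →
      st.2 = true ∨ pvMeas (pvRStep (pvPos K) (t : Int) st w).1 < pvMeas st.1) := by
  obtain ⟨hlen, hvals⟩ := hInv
  cases hj : (pvPos K).get? w with
  | none =>
      rw [pvRStep_none _ _ _ _ hj]
      exact ⟨⟨hlen, hvals⟩, le_refl _, fun h => h,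
        fun _ => ⟨rfl, fun j hj' => by cases hj'⟩,
        fun h2 => Or.inl h2⟩
  | some j =>
      rw [pvRStep_some _ _ _ _ _ hj]
      obtain ⟨tj, htj, hKtj, hj0⟩ := pvPos_get_aux K 0 w j hj
      rw [zero_add] at hj0
      subst hj0
      by_cases hgt : PySem.List.pyGetD st.1 (tj : Int) 0 > PySem.List.pyGetD st.1 (t : Int) 0
      · rw [if_pos hgt]
        obtain ⟨mt, hmt, hlabt, hrt⟩ := hvals t ht
        obtain ⟨mj, hmj, hlabj, _⟩ := hvals tj htj
        have hget_t : PySem.List.pyGetD st.1 (t : Int) 0 = st.1.getD t 0 :=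
          PySem.List.pyGetD_natCast st.1 t 0
        have hget_j : PySem.List.pyGetD st.1 (tj : Int) 0 = st.1.getD tj 0 :=
          PySem.List.pyGetD_natCast st.1 tj 0
        have hset : PySem.List.pySetD st.1 (tj : Int) (PySem.List.pyGetD st.1 (t : Int) 0)
            = st.1.set tj (st.1.getD t 0) := by
          rw [hget_t]; exact PySem.List.pySetD_natCast st.1 tj _
        rw [hget_t, hget_j, hlabt, hlabj] at hgt
        have hmtj : mt < mj := by exact_mod_cast hgt
        have htjlen : tj < st.1.length := by rw [hlen]; exact htj
        have htlen : t < st.1.length := by rw [hlen]; exact ht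
        have hInv' : pvInv adj K (st.1.set tj (st.1.getD t 0)) := by
          refine ⟨by simp [hlen], ?_⟩
          intro k hk
          by_cases hktj : k = tj
          · subst hktj
            refine ⟨mt, by omega, ?_, ?_⟩
            · rw [List.getD_eq_getElem _ 0 (by simpa using htjlen),
                List.getElem_set, if_pos rfl]
              exact hlabt
            · have hedge : K.getD k 0 ∈ pvNb adj (K.getD t 0) := by
                rw [hKtj]; exact hw
              exact Relation.ReflTransGen.tail hrt hedge
          · obtain ⟨m, hm, hlab, hr⟩ := hvals k hk
            refine ⟨m, hm, ?_, hr⟩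
            have hklen : k < st.1.length := by rw [hlen]; exact hk
            rw [List.getD_eq_getElem _ 0 (by simpa using hklen),
              List.getElem_set, if_neg (by omega), ← List.getD_eq_getElem st.1 0 hklen]
            exact hlab
        have hmeaslt : pvMeas (st.1.set tj (st.1.getD t 0)) < pvMeas st.1 := by
          unfold pvMeas
          rw [List.map_set]
          apply pvSum_set_lt
          · simpa using htjlen
          · rw [List.getD_eq_getElem (st.1.map Int.toNat) 0 (by simpa using htjlen),
              List.getElem_map, ← List.getD_eq_getElem st.1 0 htjlen, hlabt, hlabj]
            simp
            omega
        rw [hset]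
        exact ⟨hInv', le_of_lt hmeaslt, fun _ => rfl,
          fun hfalse => by simp at hfalse,
          fun _ => Or.inr hmeaslt⟩
      · rw [if_neg hgt]
        refine ⟨⟨hlen, hvals⟩, le_refl _, fun h => h,
          fun _ => ⟨rfl, ?_⟩, fun h2 => Or.inl h2⟩
        intro j' hj'
        injection hj' with hjeq
        rw [← hjeq]
        omega

-- the same facts for the inner neighbour loop
theorem pvRelaxFold_facts (adj : List (Int × List Int)) (K : List Int)
    (t : Nat) (ht : t < K.length) :
    ∀ (ws : List Int) (st : List Int × Bool),
    (∀ w ∈ ws, w ∈ pvNb adj (K.getD t 0)) → pvInv adj K st.1 →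
    pvInv adj K (ws.foldl (pvRStep (pvPos K) (t : Int)) st).1 ∧
    pvMeas (ws.foldl (pvRStep (pvPos K) (t : Int)) st).1 ≤ pvMeas st.1 ∧
    (st.2 = true → (ws.foldl (pvRStep (pvPos K) (t : Int)) st).2 = true) ∧
    ((ws.foldl (pvRStep (pvPos K) (t : Int)) st).2 = false →
      ws.foldl (pvRStep (pvPos K) (t : Int)) st = st ∧
      ∀ w ∈ ws, ∀ j : Int, (pvPos K).get? w = some j →
        PySem.List.pyGetD st.1 j 0 ≤ PySem.List.pyGetD st.1 (t : Int) 0) ∧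
    ((ws.foldl (pvRStep (pvPos K) (t : Int)) st).2 = true →
      st.2 = true ∨ pvMeas (ws.foldl (pvRStep (pvPos K) (t : Int)) st).1 < pvMeas st.1) := by
  intro ws
  induction ws with
  | nil =>
      intro st _ hInv
      simp only [List.foldl_nil]
      exact ⟨hInv, le_refl _, fun h => h, fun _ => ⟨by trivial, fun w hw => by cases hw⟩,
        fun h2 => Or.inl h2⟩
  | cons w ws ih =>
      intro st hws hInv
      simp only [List.foldl_cons]
      obtain ⟨S1, S2, S3, S4, S5⟩ :=
        pvRStep_facts adj K t ht st w (hws w List.mem_cons_self) hInv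
      obtain ⟨I1, I2, I3, I4, I5⟩ :=
        ih (pvRStep (pvPos K) (↑t) st w) (fun w' hw' => hws w' (List.mem_cons_of_mem _ hw')) S1
      refine ⟨I1, le_trans I2 S2, fun h => I3 (S3 h), ?_, ?_⟩
      · intro hfalse
        have hr1 : (pvRStep (pvPos K) (↑t) st w).2 = false := by
          cases hb : (pvRStep (pvPos K) (↑t) st w).2
          · rfl
          · rw [I3 hb] at hfalse; cases hfalse
        obtain ⟨heq, hcond⟩ := S4 hr1
        rw [heq] at hfalse I4 ⊢
        obtain ⟨heq2, hcond2⟩ := I4 hfalse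
        refine ⟨heq2, ?_⟩
        intro w' hw' j hj
        rcases List.mem_cons.1 hw' with rfl | hmem
        · exact hcond j hj
        · exact hcond2 w' hmem j hj
      · intro htrue
        cases hb : (pvRStep (pvPos K) (↑t) st w).2
        · obtain ⟨heq, _⟩ := S4 hb
          rw [heq] at htrue I5 ⊢
          exact I5 htrue
        · rcases S5 hb with h | h
          · exact Or.inl h
          · exact Or.inr (lt_of_le_of_lt I2 h)

-- the same facts for one full pass
theorem pvPass_facts (adj : List (Int × List Int)) (K : List Int) :
    ∀ (E : List (Int × Int)) (st : List Int × Bool),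
    (∀ iu ∈ E, ∃ t : Nat, t < K.length ∧ iu.1 = (t : Int) ∧ iu.2 = K.getD t 0) →
    pvInv adj K st.1 →
    pvInv adj K ((E.foldl
        (fun st iu => ((PySem.Dict.mk adj).getD iu.2 []).foldl (pvRStep (pvPos K) iu.1) st)
        st).1) ∧
    pvMeas ((E.foldl
        (fun st iu => ((PySem.Dict.mk adj).getD iu.2 []).foldl (pvRStep (pvPos K) iu.1) st)
        st).1) ≤ pvMeas st.1 ∧
    (st.2 = true → ((E.foldl
        (fun st iu => ((PySem.Dict.mk adj).getD iu.2 []).foldl (pvRStep (pvPos K) iu.1) st)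
        st).2) = true) ∧
    (((E.foldl
        (fun st iu => ((PySem.Dict.mk adj).getD iu.2 []).foldl (pvRStep (pvPos K) iu.1) st)
        st).2) = false →
      (E.foldl
        (fun st iu => ((PySem.Dict.mk adj).getD iu.2 []).foldl (pvRStep (pvPos K) iu.1) st)
        st) = st ∧
      ∀ iu ∈ E, ∀ w ∈ pvNb adj iu.2, ∀ j : Int, (pvPos K).get? w = some j →
        PySem.List.pyGetD st.1 j 0 ≤ PySem.List.pyGetD st.1 iu.1 0) ∧
    (((E.foldl
        (fun st iu => ((PySem.Dict.mk adj).getD iu.2 []).foldl (pvRStep (pvPos K) iu.1) st)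
        st).2) = true →
      st.2 = true ∨ pvMeas ((E.foldl
        (fun st iu => ((PySem.Dict.mk adj).getD iu.2 []).foldl (pvRStep (pvPos K) iu.1) st)
        st).1) < pvMeas st.1) := by
  intro E
  induction E with
  | nil =>
      intro st _ hInv
      simp only [List.foldl_nil]
      exact ⟨hInv, le_refl _, fun h => h, fun _ => ⟨by trivial, fun iu hiu => by cases hiu⟩,
        fun h2 => Or.inl h2⟩
  | cons iu E ih =>
      intro st hE hInv
      simp only [List.foldl_cons]
      obtain ⟨t, ht, h1, h2⟩ := hE iu List.mem_cons_self
      rw [h1, h2]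
      have hws : ∀ w ∈ (PySem.Dict.mk adj).getD (K.getD t 0) [],
          w ∈ pvNb adj (K.getD t 0) := fun w hw => hw
      obtain ⟨S1, S2, S3, S4, S5⟩ :=
        pvRelaxFold_facts adj K t ht ((PySem.Dict.mk adj).getD (K.getD t 0) []) st hws hInv
      obtain ⟨I1, I2, I3, I4, I5⟩ :=
        ih (((PySem.Dict.mk adj).getD (K.getD t 0) []).foldl (pvRStep (pvPos K) (↑t)) st)
          (fun iu' hiu' => hE iu' (List.mem_cons_of_mem _ hiu')) S1
      refine ⟨I1, le_trans I2 S2, fun h => I3 (S3 h), ?_, ?_⟩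
      · intro hfalse
        have hr1 : (((PySem.Dict.mk adj).getD (K.getD t 0) []).foldl
            (pvRStep (pvPos K) (↑t)) st).2 = false := by
          cases hb : (((PySem.Dict.mk adj).getD (K.getD t 0) []).foldl
              (pvRStep (pvPos K) (↑t)) st).2
          · rfl
          · rw [I3 hb] at hfalse; cases hfalse
        obtain ⟨heq, hcond⟩ := S4 hr1
        rw [heq] at hfalse I4 ⊢
        obtain ⟨heq2, hcond2⟩ := I4 hfalse
        refine ⟨heq2, ?_⟩
        intro iu' hiu' w hw j hj
        rcases List.mem_cons.1 hiu' with heq | hmem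
        · rw [heq, h2] at hw
          rw [heq, h1]
          exact hcond w hw j hj
        · exact hcond2 iu' hmem w hw j hj
      · intro htrue
        cases hb : (((PySem.Dict.mk adj).getD (K.getD t 0) []).foldl
            (pvRStep (pvPos K) (↑t)) st).2
        · obtain ⟨heq, _⟩ := S4 hb
          rw [heq] at htrue I5 ⊢
          exact I5 htrue
        · rcases S5 hb with h | h
          · exact Or.inl h
          · exact Or.inr (lt_of_le_of_lt I2 h)

-- with enough fuel the label loop reaches a stable labelling
theorem pvLoop_facts (adj : List (Int × List Int)) (K : List Int) :
    ∀ (fuel : Nat) (lab : List Int), pvInv adj K lab → pvMeas lab < fuel →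
    pvInv adj K (pvLabLoop adj K (pvPos K) fuel lab) ∧
    pvNoFire adj K (pvLabLoop adj K (pvPos K) fuel lab) := by
  intro fuel
  induction fuel with
  | zero => intro lab _ hm; exact absurd hm (Nat.not_lt_zero _)
  | succ fuel ih =>
      intro lab hInv hm
      have hE : ∀ iu ∈ PySem.List.enumerate K 0, ∃ t : Nat, t < K.length ∧
          iu.1 = (t : Int) ∧ iu.2 = K.getD t 0 := by
        intro iu hiu
        rw [PySem.List.mem_enumerate_iff] at hiu
        obtain ⟨k, hk, rfl⟩ := hiu
        exact ⟨k, hk, by simp, by rw [List.getD_eq_getElem K 0 hk]⟩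
      obtain ⟨P1, P2, P3, P4, P5⟩ := pvPass_facts adj K (PySem.List.enumerate K 0) (lab, false) hE hInv
      have hstep : pvLabLoop adj K (pvPos K) (fuel + 1) lab =
          if ((PySem.List.enumerate K 0).foldl
              (fun st iu => ((PySem.Dict.mk adj).getD iu.2 []).foldl (pvRStep (pvPos K) iu.1) st)
              (lab, false)).2 = true then
            pvLabLoop adj K (pvPos K) fuel
              ((PySem.List.enumerate K 0).foldl
                (fun st iu => ((PySem.Dict.mk adj).getD iu.2 []).foldl (pvRStep (pvPos K) iu.1) st)
                (lab, false)).1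
          else
            ((PySem.List.enumerate K 0).foldl
              (fun st iu => ((PySem.Dict.mk adj).getD iu.2 []).foldl (pvRStep (pvPos K) iu.1) st)
              (lab, false)).1 := rfl
      cases hb : ((PySem.List.enumerate K 0).foldl
          (fun st iu => ((PySem.Dict.mk adj).getD iu.2 []).foldl (pvRStep (pvPos K) iu.1) st)
          (lab, false)).2
      · rw [hstep, hb]
        simp only [Bool.false_eq_true, if_false]
        obtain ⟨heq, hcond⟩ := P4 hb
        have hlab1 : ((PySem.List.enumerate K 0).foldl
            (fun st iu => ((PySem.Dict.mk adj).getD iu.2 []).foldl (pvRStep (pvPos K) iu.1) st)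
            (lab, false)).1 = lab := by rw [heq]
        rw [hlab1]
        refine ⟨hInv, ?_⟩
        intro t ht w hw j hj
        have hmem : ((t : Int), K.getD t 0) ∈ PySem.List.enumerate K 0 := by
          rw [PySem.List.mem_enumerate_iff]
          exact ⟨t, ht, by rw [List.getD_eq_getElem K 0 ht]; simp⟩
        exact hcond ((t : Int), K.getD t 0) hmem w hw j hj
      · rw [hstep, hb, if_pos rfl]
        rcases P5 hb with h | h
        · cases h
        · exact ih _ P1 (lt_of_lt_of_le h (Nat.lt_succ_iff.mp hm))

-- reachability stays inside the key list
theorem pvReach_mem (adj : List (Int × List Int))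
    (hU : ∀ u, ∀ w ∈ pvNb adj u, w ∈ adj.map Prod.fst) (a b : Int)
    (h : pvReach adj a b) (ha : a ∈ adj.map Prod.fst) : b ∈ adj.map Prod.fst := by
  induction h with
  | refl => exact ha
  | tail _ h2 ih => exact hU _ _ h2

-- at a stable labelling, labels never increase along reachability
theorem pvLv_le (adj : List (Int × List Int)) (K : List Int) (hnd : K.Nodup)
    (hK : K = adj.map Prod.fst)
    (hU : ∀ u, ∀ w ∈ pvNb adj u, w ∈ adj.map Prod.fst)
    (L : List Int) (hNF : pvNoFire adj K L) :
    ∀ a b, pvReach adj a b → ∀ s t : Nat, s < K.length → t < K.length →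
      K.getD s 0 = a → K.getD t 0 = b → L.getD t 0 ≤ L.getD s 0 := by
  intro a b h
  induction h with
  | refl =>
      intro s t hs ht hsa hta
      have hst : s = t := by
        apply (List.Nodup.getElem_inj_iff hnd).mp
        rw [← List.getD_eq_getElem K 0 hs, ← List.getD_eq_getElem K 0 ht, hsa, hta]
      subst hst
      exact le_refl _
  | @tail c d h1 h2 ih =>
      intro s t hs ht hsa htd
      have haK : a ∈ adj.map Prod.fst := by
        rw [← hK]
        rw [← hsa, List.getD_eq_getElem K 0 hs]
        exact List.getElem_mem hs
      have hcK : c ∈ K := by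
        rw [hK]
        exact pvReach_mem adj hU a c h1 haK
      obtain ⟨r, hr, hrc⟩ : ∃ r : Nat, r < K.length ∧ K.getD r 0 = c := by
        obtain ⟨r, hr, hrc⟩ := List.mem_iff_getElem.mp hcK
        exact ⟨r, hr, by rw [List.getD_eq_getElem K 0 hr]; exact hrc⟩
      have hpos : (pvPos K).get? d = some (t : Int) := by
        rw [← htd]
        exact pvPos_get_at K hnd t ht
      have hstep := hNF r hr d (by rw [hrc]; exact h2) (t : Int) hpos
      rw [PySem.List.pyGetD_natCast, PySem.List.pyGetD_natCast] at hstep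
      exact le_trans hstep (ih s r hs hr hsa hrc)

-- characterisation of the stable labels: a vertex keeps its own label iff no earlier
-- vertex reaches it
theorem pvLv_char (adj : List (Int × List Int)) (K : List Int) (hnd : K.Nodup)
    (hK : K = adj.map Prod.fst)
    (hU : ∀ u, ∀ w ∈ pvNb adj u, w ∈ adj.map Prod.fst)
    (L : List Int) (hInv : pvInv adj K L) (hNF : pvNoFire adj K L) :
    ∀ t : Nat, t < K.length →
      (L.getD t 0 = (t : Int) ↔ ∀ j : Nat, j < t → ¬ pvReach adj (K.getD j 0) (K.getD t 0)) := by
  intro t ht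
  obtain ⟨hlen, hvals⟩ := hInv
  obtain ⟨m, hm, hlab, hreach⟩ := hvals t ht
  constructor
  · intro heq j hj hR
    have hle := pvLv_le adj K hnd hK hU L hNF _ _ hR j t (lt_trans hj ht) ht rfl rfl
    obtain ⟨mj, hmj, hlabj, _⟩ := hvals j (lt_trans hj ht)
    rw [heq, hlabj] at hle
    omega
  · intro hnone
    by_cases hmt : m = t
    · rw [hlab, hmt]
    · exact absurd hreach (hnone m (lt_of_le_of_ne hm hmt))

-- A's component loop counts exactly the vertices not reached by any earlier vertex,
-- i.e. B's stable-label count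
theorem pvA_count (adj : List (Int × List Int)) (K : List Int)
    (hK : K = adj.map Prod.fst)
    (hU : ∀ u, ∀ w ∈ pvNb adj u, w ∈ adj.map Prod.fst)
    (L : List Int)
    (hchar : ∀ t : Nat, t < K.length →
      (L.getD t 0 = (t : Int) ↔ ∀ j : Nat, j < t → ¬ pvReach adj (K.getD j 0) (K.getD t 0))) :
    ∀ (ks ps : List Int) (vis : PySem.Set Int) (comps : Int),
      K = ps ++ ks →
      (∀ x, x ∈ vis ↔ ∃ u ∈ ps, pvReach adj u x) →
      (ks.foldl
        (fun (s : PySem.Set Int × Int) v =>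
          if PySem.Set.contains s.1 v then s
          else (pvBfs adj (adj.length + 1) [v] (PySem.Set.add s.1 v), s.2 + 1))
        (vis, comps)).2
      = (PySem.List.pyRange (ps.length : Int) (K.length : Int) 1).foldl
          (fun (c : Int) i => if PySem.List.pyGetD L i 0 = i then c + 1 else c) comps := by
  intro ks
  induction ks with
  | nil =>
      intro ps vis comps hKps hvis
      rw [List.foldl_nil]
      have hlen : (ps.length : Int) = (K.length : Int) := by rw [hKps]; simp
      rw [hlen, PySem.List.pyRange_one_eq_nil (le_refl _), List.foldl_nil]
  | cons v ks ih =>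
      intro ps vis comps hKps hvis
      have ht : ps.length < K.length := by rw [hKps]; simp
      have hKt : K.getD ps.length 0 = v := by
        rw [hKps, List.getD_eq_getElem _ 0 (by simp),
          List.getElem_append_right (le_refl _)]
        simp
      have hgetK : ∀ j : Nat, j < ps.length → K.getD j 0 = ps.getD j 0 := by
        intro j hj
        rw [hKps, List.getD_eq_getElem _ 0 (by simp; omega), List.getElem_append_left hj,
          List.getD_eq_getElem ps 0 hj]
      have hmem_iff : v ∈ vis ↔ ∃ j : Nat, j < ps.length ∧ pvReach adj (K.getD j 0) v := by
        rw [hvis v]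
        constructor
        · rintro ⟨u, hu, hr⟩
          obtain ⟨j, hj, hju⟩ := List.mem_iff_getElem.mp hu
          refine ⟨j, hj, ?_⟩
          rw [hgetK j hj, List.getD_eq_getElem ps 0 hj, hju]
          exact hr
        · rintro ⟨j, hj, hr⟩
          refine ⟨ps.getD j 0, by rw [List.getD_eq_getElem ps 0 hj]; exact List.getElem_mem hj, ?_⟩
          rw [← hgetK j hj]
          exact hr
      rw [PySem.List.pyRange_one_cons (by exact_mod_cast ht), List.foldl_cons, List.foldl_cons]
      have hchar_t := hchar ps.length ht
      by_cases hv : v ∈ vis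
      · have hBno : ¬ (PySem.List.pyGetD L ((ps.length : Nat) : Int) 0 = ((ps.length : Nat) : Int)) := by
          rw [PySem.List.pyGetD_natCast]
          rw [hchar_t]
          intro hall
          obtain ⟨j, hj, hr⟩ := hmem_iff.1 hv
          exact hall j hj (by rw [hKt]; exact hr)
        rw [if_pos ((PySem.Set.contains_iff vis v).2 hv), if_neg hBno]
        have hiff : ∀ x, x ∈ vis ↔ ∃ u ∈ ps ++ [v], pvReach adj u x := by
          intro x
          rw [hvis x]
          constructor
          · rintro ⟨u, hu, hr⟩
            exact ⟨u, List.mem_append_left _ hu, hr⟩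
          · rintro ⟨u, hu, hr⟩
            rcases List.mem_append.1 hu with h | h
            · exact ⟨u, h, hr⟩
            · simp at h
              subst h
              obtain ⟨u', hu', hr'⟩ := (hvis u).1 hv
              exact ⟨u', hu', Relation.ReflTransGen.trans hr' hr⟩
        have := ih (ps ++ [v]) vis comps (by rw [hKps]; simp) hiff
        rw [List.length_append] at this
        have hcast : ((ps.length + [v].length : Nat) : Int) = (ps.length : Int) + 1 := by
          simp
        rw [hcast] at this
        exact this
      · have hByes : PySem.List.pyGetD L ((ps.length : Nat) : Int) 0 = ((ps.length : Nat) : Int) := by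
          rw [PySem.List.pyGetD_natCast]
          rw [hchar_t]
          intro j hj hr
          exact hv (hmem_iff.2 ⟨j, hj, by rw [← hKt]; exact hr⟩)
        rw [pvContains_false hv]
        simp only [Bool.false_eq_true, if_false]
        rw [if_pos hByes]
        have hclvis : ∀ u ∈ vis, ∀ w ∈ pvNb adj u, w ∈ vis := by
          intro u hu w hw
          obtain ⟨u', hu', hr⟩ := (hvis u).1 hu
          exact (hvis w).2 ⟨u', hu', Relation.ReflTransGen.tail hr hw⟩
        have hvisU : ∀ x ∈ vis, x ∈ adj.map Prod.fst := by
          intro x hx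
          obtain ⟨u', hu', hr⟩ := (hvis x).1 hx
          refine pvReach_mem adj hU u' x hr ?_
          rw [← hK, hKps]
          exact List.mem_append_left _ hu'
        have hvK : v ∈ adj.map Prod.fst := by
          rw [← hK, hKps]
          exact List.mem_append_right _ List.mem_cons_self
        have hbfs := pvBfs_mem_iff adj hU vis hclvis hvisU v hvK hv
        have hiff : ∀ x, x ∈ pvBfs adj (adj.length + 1) [v] (PySem.Set.add vis v) ↔
            ∃ u ∈ ps ++ [v], pvReach adj u x := by
          intro x
          rw [hbfs x]
          constructor
          · rintro (hx | hx)
            · obtain ⟨u, hu, hr⟩ := (hvis x).1 hx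
              exact ⟨u, List.mem_append_left _ hu, hr⟩
            · exact ⟨v, List.mem_append_right _ List.mem_cons_self, hx⟩
          · rintro ⟨u, hu, hr⟩
            rcases List.mem_append.1 hu with h | h
            · exact Or.inl ((hvis x).2 ⟨u, h, hr⟩)
            · simp at h
              subst h
              exact Or.inr hr
        have := ih (ps ++ [v]) (pvBfs adj (adj.length + 1) [v] (PySem.Set.add vis v))
          (comps + 1) (by rw [hKps]; simp) hiff
        rw [List.length_append] at this
        have hcast : ((ps.length + [v].length : Nat) : Int) = (ps.length : Int) + 1 := by
          simp
        rw [hcast] at this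
        exact this

-- the edge sums of the two ports agree (uses Pre_ clause (a))
theorem pv_count_edges_eq (adj : List (Int × List Int))
    (hnd : (adj.map Prod.fst).Nodup) :
    pv_count_edges adj
      = PySem.Int.floordiv (((PySem.Dict.mk adj).values.map PySem.List.len).sum) 2 := by
  unfold pv_count_edges
  congr 1
  rw [PySem.Dict.keys_mk, PySem.Dict.values_mk, List.map_map, List.map_map]
  refine congrArg List.sum (List.map_congr_left ?_)
  intro p hp
  have hitems : (p.1, p.2) ∈ (PySem.Dict.mk adj).items := by
    show (p.1, p.2) ∈ adj
    simpa using hp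
  have hkeys : (PySem.Dict.mk adj).keys.Nodup := by
    rw [PySem.Dict.keys_mk]; exact hnd
  simp only [Function.comp]
  rw [PySem.Dict.getD_of_mem_items _ hitems hkeys]

-- ===== VERDICT (by name: the statement is the Claim_ definition above) =====
theorem cycle_rank_spec : Claim_equal_cycle_rank := by
  intro adj _ hPre
  obtain ⟨hnd, hPre2⟩ := hPre
  show cycle_rank adj = cycle_rank_alt adj
  have hU := pvNb_closed adj hPre2
  have hkeys : (PySem.Dict.mk adj).keys = adj.map Prod.fst := PySem.Dict.keys_mk adj
  have hInv0 : pvInv adj (adj.map Prod.fst)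
      (PySem.List.pyRange 0 (((adj.map Prod.fst).length : Nat) : Int) 1) := by
    constructor
    · rw [PySem.List.length_pyRange_one]; simp
    · intro t ht
      refine ⟨t, le_refl _, ?_, Relation.ReflTransGen.refl⟩
      rw [List.getD_eq_getElem _ 0 (by rw [PySem.List.length_pyRange_one]; simpa using ht),
        PySem.List.getElem_pyRange_one]
      simp
  have hmeas0 : pvMeas (PySem.List.pyRange 0 (((adj.map Prod.fst).length : Nat) : Int) 1)
      < (adj.map Prod.fst).length * (adj.map Prod.fst).length + 1 := by
    unfold pvMeas
    have h1 : ((PySem.List.pyRange 0 (((adj.map Prod.fst).length : Nat) : Int) 1).map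
        Int.toNat).sum ≤ (adj.map Prod.fst).length * (adj.map Prod.fst).length := by
      refine le_trans (List.sum_le_card_nsmul _ (adj.map Prod.fst).length ?_) ?_
      · intro x hx
        simp only [List.mem_map] at hx
        obtain ⟨y, hy, rfl⟩ := hx
        rw [PySem.List.mem_pyRange_one] at hy
        omega
      · rw [List.length_map, PySem.List.length_pyRange_one]
        simp [smul_eq_mul]
    omega
  obtain ⟨hInvL, hNFL⟩ := pvLoop_facts adj (adj.map Prod.fst)
    ((adj.map Prod.fst).length * (adj.map Prod.fst).length + 1) _ hInv0 hmeas0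
  have hchar := pvLv_char adj (adj.map Prod.fst) hnd rfl hU _ hInvL hNFL
  have hvis0 : ∀ x : Int, x ∈ PySem.Set.empty ↔ ∃ u ∈ ([] : List Int), pvReach adj u x := by
    intro x
    constructor
    · intro hx; cases hx
    · rintro ⟨u, hu, _⟩; cases hu
  have hcomps := pvA_count adj (adj.map Prod.fst) rfl hU _ hchar
    (adj.map Prod.fst) [] PySem.Set.empty 0 rfl hvis0
  have hsize : pv_count_vertices adj = (((adj.map Prod.fst).length : Nat) : Int) := by
    unfold pv_count_vertices
    rw [← hkeys]
    simp [PySem.Dict.size, PySem.Dict.keys]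
  show pv_count_edges adj - pv_count_vertices adj
      + ((PySem.Dict.mk adj).keys.foldl
          (fun (s : PySem.Set Int × Int) v =>
            if PySem.Set.contains s.1 v then s
            else (pvBfs adj (adj.length + 1) [v] (PySem.Set.add s.1 v), s.2 + 1))
          (PySem.Set.empty, 0)).2 = _
  rw [hkeys, pv_count_edges_eq adj hnd, hsize, hcomps]
  show _ = PySem.Int.floordiv (((PySem.Dict.mk adj).values.map PySem.List.len).sum) 2
      - (((PySem.Dict.mk adj).keys.length : Nat) : Int)
      + ((PySem.List.pyRange 0 (((PySem.Dict.mk adj).keys.length : Nat) : Int) 1).foldl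
          (fun (c : Int) i =>
            if PySem.List.pyGetD
                (pvLabLoop adj (PySem.Dict.mk adj).keys (pvPos (PySem.Dict.mk adj).keys)
                  ((PySem.Dict.mk adj).keys.length * (PySem.Dict.mk adj).keys.length + 1)
                  (PySem.List.pyRange 0 (((PySem.Dict.mk adj).keys.length : Nat) : Int) 1))
                i 0 = i
            then c + 1 else c) 0)
  rw [hkeys]
  norm_num
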